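-- pv_equiv track=rewrite | github.com/Elenaa24/AI | Lab1/Lab1_10.py | index_mat
-- ===== SOURCE A (Python) =====
-- def index_mat(mat):
--     #input: mat-matrice
--     #output: nr intreg
--     #functia cauta linia cu cei mai multi 1, afla nr lor print gasirea (cautare binara) primei pozitii pe care se afla 1
--     n = len(mat)
--
--     best = len(mat[0]) + 1
--     pos_best = -1
--
--     for i in range(n):
--         lo = 0
--         hi = len(mat[i]) - 1
--
--         ans = hi + 1
--
--         while lo <= hi:
--             mid = (lo + hi) // 2
--             if mat[i][mid] == 1:
--                 ans = mid
--                 hi = mid - 1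
--             else:
--                 lo = mid + 1
--
--         if ans < best:
--             best = ans
--             pos_best = i
--
--     #returnez +1 pt ca am indentarea e de la 0
--     return pos_best+1
-- ===== SOURCE B (Python) =====
-- def index_mat(mat):
--     # recursive binary search with the same mid sequence as A's while loop
--     def first_one(row, lo, hi, cand):
--         if lo > hi:
--             return cand
--         mid = (lo + hi) // 2
--         if row[mid] == 1:
--             return first_one(row, lo, mid - 1, mid)
--         return first_one(row, mid + 1, hi, cand)
--
--     scores = [first_one(row, 0, len(row) - 1, len(row)) for row in mat]
--     return scores.index(min(scores)) + 1
-- ===== Notes on version B (the rewrite author's own statement) =====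
-- stated objective: simpler
-- what changed: The iterative while-loop binary search becomes a recursive helper with the identical mid sequence, and the hand-maintained (best, pos_best) accumulator with its sentinel len(mat[0])+1 is replaced by computing all scores once and returning scores.index(min(scores))+1 (row 0 always beats the sentinel, so A returns the first index of the minimal score).
-- outside the precondition, e.g. on index_mat([]): A raises IndexError, B raises ValueError
import Mathlib
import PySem

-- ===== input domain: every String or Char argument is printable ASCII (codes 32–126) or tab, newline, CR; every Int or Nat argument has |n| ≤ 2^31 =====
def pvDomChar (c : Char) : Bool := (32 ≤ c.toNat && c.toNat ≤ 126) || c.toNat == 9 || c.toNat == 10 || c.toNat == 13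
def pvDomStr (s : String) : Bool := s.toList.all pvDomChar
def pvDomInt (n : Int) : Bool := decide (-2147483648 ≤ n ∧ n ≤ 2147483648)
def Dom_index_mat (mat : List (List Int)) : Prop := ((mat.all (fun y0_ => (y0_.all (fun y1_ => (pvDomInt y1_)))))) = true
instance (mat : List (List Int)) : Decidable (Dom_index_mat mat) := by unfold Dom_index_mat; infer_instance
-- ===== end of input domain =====

-- B replaces A's iterative inner binary search by a recursive helper (same mid sequence)
-- and A's (best, pos_best) sentinel accumulator by scores.index(min(scores)) + 1: simpler.
-- ===== PORT A =====
-- A's inner while loop, step for step (state lo, hi, ans); mat[i][mid] is always in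
-- range (0 ≤ lo ≤ mid ≤ hi < len row), so pyGetD with default 0 is exact there.
def whileA (row : List Int) (lo hi ans : Int) : Int :=
  if h : lo ≤ hi then
    let mid := PySem.Int.floordiv (lo + hi) 2
    if PySem.List.pyGetD row mid 0 = 1 then whileA row lo (mid - 1) mid
    else whileA row (mid + 1) hi ans
  else ans
termination_by (hi - lo + 1).toNat
decreasing_by
  · have := PySem.Int.floordiv_two_mid_bounds h; omega
  · have := PySem.Int.floordiv_two_mid_bounds h; omega

def index_mat (mat : List (List Int)) : Int :=
  let n : Int := (mat.length : Int)
  let best : Int := ((PySem.List.pyGetD mat 0 []).length : Int) + 1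
  let st :=
    (PySem.List.pyRange 0 n 1).foldl
      (fun (s : Int × Int) i =>
        let row := PySem.List.pyGetD mat i []
        let hi : Int := (row.length : Int) - 1
        let ans := whileA row 0 hi (hi + 1)
        if ans < s.1 then (ans, i) else s)
      (best, -1)
  st.2 + 1

-- ===== PORT B =====
-- Source B's recursive first_one; row[mid] is always in range, pyGetD 0 is exact there.
def firstOne (row : List Int) (lo hi cand : Int) : Int :=
  if h : lo > hi then cand
  else
    let mid := PySem.Int.floordiv (lo + hi) 2
    if PySem.List.pyGetD row mid 0 = 1 then firstOne row lo (mid - 1) mid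
    else firstOne row (mid + 1) hi cand
termination_by (hi - lo + 1).toNat
decreasing_by
  · have := PySem.Int.floordiv_two_mid_bounds (by omega : lo ≤ hi); omega
  · have := PySem.Int.floordiv_two_mid_bounds (by omega : lo ≤ hi); omega

def index_mat_alt (mat : List (List Int)) : Int :=
  let scores := mat.map (fun row => firstOne row 0 ((row.length : Int) - 1) (row.length : Int))
  match PySem.List.min? scores (fun x => x) with
  | none => 0
  | some m => ((PySem.List.index? scores m).getD 0 : Int) + 1

-- ===== PRECONDITION & SPEC =====
-- Pre_ excludes only the empty matrix, on which A raises IndexError at mat[0] (and B raises ValueError at min([])).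
def Pre_index_mat (mat : List (List Int)) : Prop := mat ≠ []
instance (mat : List (List Int)) : Decidable (Pre_index_mat mat) := by unfold Pre_index_mat; infer_instance
def pvWitness_index_mat : List (List Int) := [[0, 1]]

def Spec_index_mat (mat : List (List Int)) (out : Int) : Prop := out = index_mat_alt mat
instance (mat : List (List Int)) (out : Int) : Decidable (Spec_index_mat mat out) := by unfold Spec_index_mat; infer_instance

-- ===== CLAIM (what is proved, stated in full; the proofs are below) =====
def Claim_equal_index_mat : Prop := ∀ (mat : List (List Int)), Dom_index_mat mat → Pre_index_mat mat → Spec_index_mat mat (index_mat mat)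

-- ===== LEMMAS AND PROOFS =====

-- The two inner searches are the same recursion (A carries 'ans', B carries 'cand').
theorem whileA_eq_firstOne (row : List Int) (lo hi ans : Int) :
    whileA row lo hi ans = firstOne row lo hi ans := by
  fun_induction whileA row lo hi ans with
  | case1 lo hi ans h mid hrow ih =>
      rw [firstOne]; simp only [not_lt.mpr h, dite_false]
      rw [if_pos hrow]; exact ih
  | case2 lo hi ans h mid hrow ih =>
      rw [firstOne]; simp only [not_lt.mpr h, dite_false]
      rw [if_neg hrow]; exact ih
  | case3 lo hi ans h =>
      rw [firstOne]; simp only [dif_pos (by omega : lo > hi)]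

-- The search result is at most max cand hi.
theorem firstOne_le (row : List Int) (lo hi cand : Int) (h : cand ≤ max cand hi) :
    firstOne row lo hi cand ≤ max cand hi := by
  fun_induction firstOne row lo hi cand with
  | case1 lo hi cand h' => exact h
  | case2 lo hi cand h' mid hrow ih =>
      have hb := PySem.Int.floordiv_two_mid_bounds (by omega : lo ≤ hi)
      have : firstOne row lo (mid - 1) mid ≤ max mid (mid - 1) := ih (by omega)
      omega
  | case3 lo hi cand h' mid hrow ih =>
      have : firstOne row (mid + 1) hi cand ≤ max cand hi := ih (by omega)
      omega

-- enumerate commutes with mapping the payload.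
theorem enumerate_map_snd {α β : Type} (f : α → β) (l : List α) (s : Int) :
    (PySem.List.enumerate l s).map (fun p => (p.1, f p.2)) = PySem.List.enumerate (l.map f) s := by
  induction l generalizing s with
  | nil => simp [PySem.List.enumerate_nil]
  | cons x t ih => simp [PySem.List.enumerate_cons, ih]

-- Characterisation of A's (best, pos_best) fold over the score list.
theorem fold_min_char (q : List Int) (s b p : Int) :
    (PySem.List.enumerate q s).foldl
        (fun (acc : Int × Int) (x : Int × Int) => if x.2 < acc.1 then (x.2, x.1) else acc) (b, p)
      = match PySem.List.min? q (fun y => y) with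
        | none => (b, p)
        | some m => if m < b then (m, s + ((PySem.List.index? q m).getD 0 : Int)) else (b, p) := by
  induction q generalizing s b p with
  | nil =>
    rw [(PySem.List.min?_eq_none_iff ([] : List Int) (fun y => y)).mpr rfl]
    simp [PySem.List.enumerate_nil]
  | cons x t ih =>
    rw [PySem.List.enumerate_cons, List.foldl_cons, PySem.List.min?_id_cons]
    dsimp only
    rcases ht : PySem.List.min? t (fun y => y) with _ | mt
    · have ht' : t = [] := (PySem.List.min?_eq_none_iff t _).mp ht
      subst ht'
      simp only [List.foldl_nil, PySem.List.enumerate_nil, PySem.List.index?_cons_self]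
      split_ifs <;> simp
    · have hmem : mt ∈ t := PySem.List.min?_mem ht
      have hfold : t.foldl min x = min x mt := by
        cases t with
        | nil => simp at hmem
        | cons y t' =>
          rw [PySem.List.min?_id_cons y t'] at ht
          injection ht with h
          rw [List.foldl_cons, List.foldl_assoc, h]
      rw [hfold]
      obtain ⟨k, hk⟩ := Option.isSome_iff_exists.mp ((PySem.List.index?_isSome_iff t mt).mpr hmem)
      by_cases hx : x < b
      · rw [if_pos hx, ih, ht]
        dsimp only
        by_cases hmx : mt < x
        · rw [if_pos hmx, min_eq_right (by omega : mt ≤ x), if_pos (by omega : mt < b),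
              PySem.List.index?_cons_of_ne t (by omega : x ≠ mt), hk]
          simp only [Option.map_some, Option.getD_some]
          congr 1
          push_cast; ring
        · rw [if_neg hmx, min_eq_left (by omega : x ≤ mt), if_pos hx,
              PySem.List.index?_cons_self]
          simp
      · rw [if_neg hx, ih, ht]
        dsimp only
        by_cases hmb : mt < b
        · rw [if_pos hmb, min_eq_right (by omega : mt ≤ x), if_pos hmb,
              PySem.List.index?_cons_of_ne t (by omega : x ≠ mt), hk]
          simp only [Option.map_some, Option.getD_some]
          congr 1
          push_cast; ring
        · rw [if_neg hmb, if_neg (by omega : ¬ min x mt < b)]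

-- Fold over an enumerated mapped list = fold over the enumerated list with the map inlined.
theorem foldl_enumerate_map {α β σ : Type} (f : α → β) (l : List α) (s : Int)
    (step : σ → Int × β → σ) (init : σ) :
    (PySem.List.enumerate (l.map f) s).foldl step init
      = (PySem.List.enumerate l s).foldl (fun acc p => step acc (p.1, f p.2)) init := by
  rw [← enumerate_map_snd, List.foldl_map]

-- A's per-row score equals B's (ans's initial value hi+1 is cand = len row).
theorem score_eq (row : List Int) :
    whileA row 0 ((row.length : Int) - 1) (((row.length : Int) - 1) + 1)
      = firstOne row 0 ((row.length : Int) - 1) (row.length : Int) := by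
  rw [whileA_eq_firstOne]
  congr 1
  ring

-- ===== VERDICT (by name: the statement is the Claim_ definition above) =====
theorem index_mat_spec : Claim_equal_index_mat := by
  unfold Claim_equal_index_mat
  intro mat _ hpre
  unfold Pre_index_mat at hpre
  unfold Spec_index_mat
  cases mat with
  | nil => exact absurd rfl hpre
  | cons r rest =>
    unfold index_mat index_mat_alt
    rw [PySem.List.pyGetD_zero_cons]
    show (List.foldl
        (fun (s : Int × Int) (i : Int) =>
          let row := PySem.List.pyGetD (r :: rest) i []
          let hi : Int := (row.length : Int) - 1
          let ans := whileA row 0 hi (hi + 1)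
          if ans < s.1 then (ans, i) else s)
        (((r.length : Int) + 1), -1) (PySem.List.pyRange 0 (((r :: rest).length : Int)) 1)).2 + 1
      = match PySem.List.min? ((r :: rest).map
            (fun row => firstOne row 0 ((row.length : Int) - 1) (row.length : Int))) (fun x => x) with
        | none => 0
        | some m => ((PySem.List.index? ((r :: rest).map
            (fun row => firstOne row 0 ((row.length : Int) - 1) (row.length : Int))) m).getD 0 : Int) + 1
    have he := PySem.List.enumerate_eq_map_pyRange (r :: rest) ([] : List Int)
    simp only [PySem.List.len_eq] at he
    have hA :
        (PySem.List.enumerate ((r :: rest).map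
              (fun row => firstOne row 0 ((row.length : Int) - 1) (row.length : Int))) 0).foldl
            (fun (acc : Int × Int) (x : Int × Int) => if x.2 < acc.1 then (x.2, x.1) else acc)
            (((r.length : Int) + 1), -1)
        = (List.foldl
            (fun (s : Int × Int) (i : Int) =>
              let row := PySem.List.pyGetD (r :: rest) i []
              let hi : Int := (row.length : Int) - 1
              let ans := whileA row 0 hi (hi + 1)
              if ans < s.1 then (ans, i) else s)
            (((r.length : Int) + 1), -1) (PySem.List.pyRange 0 (((r :: rest).length : Int)) 1)) := by
      rw [foldl_enumerate_map, he, List.foldl_map]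
      simp only [← score_eq]
    rw [← hA, fold_min_char]
    simp only [List.map_cons]
    rw [PySem.List.min?_id_cons]
    dsimp only
    have hfr : firstOne r 0 ((r.length : Int) - 1) (r.length : Int) ≤ (r.length : Int) := by
      have h1 := firstOne_le r 0 ((r.length : Int) - 1) (r.length : Int) (le_max_left _ _)
      have h2 : max ((r.length : Int)) ((r.length : Int) - 1) = (r.length : Int) :=
        max_eq_left (by omega)
      omega
    have hmin : PySem.List.min?
        (firstOne r 0 ((r.length : Int) - 1) (r.length : Int)
          :: rest.map (fun row => firstOne row 0 ((row.length : Int) - 1) (row.length : Int)))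
        (fun y => y)
        = some ((rest.map (fun row => firstOne row 0 ((row.length : Int) - 1) (row.length : Int))).foldl
            min (firstOne r 0 ((r.length : Int) - 1) (r.length : Int))) :=
      PySem.List.min?_id_cons _ _
    have hM := PySem.List.min?_isMin hmin _ (List.mem_cons_self)
    rw [if_pos (by omega :
      (rest.map (fun row => firstOne row 0 ((row.length : Int) - 1) (row.length : Int))).foldl
          min (firstOne r 0 ((r.length : Int) - 1) (r.length : Int)) < (r.length : Int) + 1)]
    dsimp only
    ring
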